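-- pv_equiv track=rewrite | github.com/soyukke/lean-unsolved | scripts/erdos20_structure.py | is_sunflower
-- ===== SOURCE A (Python) =====
-- from itertools import combinations
--
-- def is_sunflower(sets, k=3):
--     """k個の集合がひまわりを形成するか判定"""
--     if len(sets) < k:
--         return False
--     for combo in combinations(sets, k):
--         combo_list = [set(s) for s in combo]
--         core = combo_list[0]
--         for s in combo_list[1:]:
--             core = core & s
--         # 花弁（核を除いた部分）が互いに素か確認
--         petals = [s - core for s in combo_list]
--         pairwise_disjoint = True
--         for i in range(len(petals)):
--             for j in range(i + 1, len(petals)):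
--                 if petals[i] & petals[j]:
--                     pairwise_disjoint = False
--                     break
--             if not pairwise_disjoint:
--                 break
--         if pairwise_disjoint:
--             return True
--     return False
-- ===== SOURCE B (Python) =====
-- from itertools import combinations
--
-- def is_sunflower(sets, k=3):
--     """k個の集合がひまわりを形成するか判定"""
--     if len(sets) < k:
--         return False
--     for combo in combinations(sets, k):
--         core = set.intersection(*map(set, combo))
--         seen = set()
--         for s in combo:
--             petal = set(s) - core
--             if petal & seen:
--                 break
--             seen |= petal
--         else:
--             return True
--     return False
-- ===== Notes on version B (the rewrite author's own statement) =====
-- stated objective: alternative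
-- what changed: The nested pairwise petal-intersection double loop is replaced by a single pass that maintains an accumulated 'seen' union and tests each petal against it once (and the manual core-intersection loop by set.intersection(*...)).
import Mathlib
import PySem

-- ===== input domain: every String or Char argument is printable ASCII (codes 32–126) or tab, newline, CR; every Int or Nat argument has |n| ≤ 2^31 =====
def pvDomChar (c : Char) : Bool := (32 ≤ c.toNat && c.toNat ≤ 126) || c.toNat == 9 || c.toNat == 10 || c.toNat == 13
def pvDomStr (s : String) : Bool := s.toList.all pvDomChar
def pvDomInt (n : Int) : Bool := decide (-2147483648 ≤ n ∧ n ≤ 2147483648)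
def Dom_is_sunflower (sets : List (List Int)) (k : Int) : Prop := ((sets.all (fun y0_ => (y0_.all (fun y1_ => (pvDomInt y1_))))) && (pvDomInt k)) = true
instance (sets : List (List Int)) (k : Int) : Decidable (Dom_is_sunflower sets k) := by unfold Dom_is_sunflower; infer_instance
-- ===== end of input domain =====

-- B replaces A's nested pairwise petal-disjointness double loop with a single pass over the
-- petals that maintains an accumulated union of the petals seen so far (objective: alternative).


-- ===== PORT A =====
-- itertools.combinations(xs, n): all n-element subsequences, in itertools' order
def pvCombos {α : Type} : List α → Nat → List (List α)
  | _, 0 => [[]]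
  | [], _ + 1 => []
  | x :: rest, n + 1 => ((pvCombos rest n).map (fun c => x :: c)) ++ pvCombos rest (n + 1)

-- A's nested i/j loop over petals (early break only short-circuits; the Bool result is the same)
def pvPairwiseDisjoint : List (PySem.Set Int) → Bool
  | [] => true
  | p :: rest => (rest.all fun q => (PySem.Set.inter p q).isEmpty) && pvPairwiseDisjoint rest

def is_sunflower (sets : List (List Int)) (k : Int) : Bool :=
  if (sets.length : Int) < k then false
  else
    (pvCombos sets k.toNat).any fun combo =>
      match combo.map (fun s => PySem.Set.ofList s) with
      | [] => false  -- Python raises IndexError at combo_list[0] here (only k = 0; outside Pre_)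
      | c0 :: cs =>
        let core := cs.foldl PySem.Set.inter c0
        pvPairwiseDisjoint ((combo.map (fun s => PySem.Set.ofList s)).map
          (fun s => PySem.Set.diff s core))

-- ===== PORT B =====
-- B's single pass: test each petal against the union of the petals already seen
def pvPetalScan (core : PySem.Set Int) : List (List Int) → PySem.Set Int → Bool
  | [], _ => true
  | s :: rest, seen =>
    let petal := PySem.Set.diff (PySem.Set.ofList s) core
    if (PySem.Set.inter petal seen).isEmpty then
      pvPetalScan core rest (PySem.Set.union seen petal)
    else false

def is_sunflower_alt (sets : List (List Int)) (k : Int) : Bool :=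
  if (sets.length : Int) < k then false
  else
    (pvCombos sets k.toNat).any fun combo =>
      match combo.map (fun s => PySem.Set.ofList s) with
      | [] => false  -- set.intersection with no arguments: Python raises (only k = 0; outside Pre_)
      | c0 :: cs => pvPetalScan (cs.foldl PySem.Set.inter c0) combo PySem.Set.empty

-- ===== PRECONDITION & SPEC =====
-- Pre_ excludes exactly k ≤ 0, where the Python A raises (IndexError at combo_list[0] for
-- k = 0, ValueError from combinations for k < 0).
def Pre_is_sunflower (sets : List (List Int)) (k : Int) : Prop := 1 ≤ k
instance (sets : List (List Int)) (k : Int) : Decidable (Pre_is_sunflower sets k) := by unfold Pre_is_sunflower; infer_instance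
def pvWitness_is_sunflower : List (List Int) × Int := ([[1, 2], [1, 3], [1, 4]], 3)

def Spec_is_sunflower (sets : List (List Int)) (k : Int) (out : Bool) : Prop := out = is_sunflower_alt sets k
instance (sets : List (List Int)) (k : Int) (out : Bool) : Decidable (Spec_is_sunflower sets k out) := by unfold Spec_is_sunflower; infer_instance

-- ===== CLAIM (what is proved, stated in full; the proofs are below) =====
def Claim_equal_is_sunflower : Prop := ∀ (sets : List (List Int)) (k : Int), Dom_is_sunflower sets k → Pre_is_sunflower sets k → Spec_is_sunflower sets k (is_sunflower sets k)

-- ===== LEMMAS AND PROOFS =====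

-- emptiness of an intersection, as membership
theorem pvIE_iff (p q : List Int) :
    (PySem.Set.inter p q).isEmpty = true ↔ ∀ x ∈ p, x ∉ q := by
  rw [List.isEmpty_iff, List.eq_nil_iff_forall_not_mem]
  constructor
  · intro h x hp hq; exact h x (by rw [PySem.Set.mem_inter]; exact ⟨hp, hq⟩)
  · intro h x hx; rw [PySem.Set.mem_inter] at hx; exact h x hx.1 hx.2

theorem pvIE_comm (p q : List Int) :
    (PySem.Set.inter p q).isEmpty = (PySem.Set.inter q p).isEmpty := by
  by_cases h : (PySem.Set.inter p q).isEmpty = true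
  · rw [h]; symm; rw [pvIE_iff]
    rw [pvIE_iff] at h
    intro x hq hp; exact h x hp hq
  · rw [Bool.not_eq_true] at h; rw [h]; symm
    rw [Bool.eq_false_iff]
    intro h'; rw [pvIE_iff] at h'
    have : (PySem.Set.inter p q).isEmpty = true := by
      rw [pvIE_iff]; intro x hp hq; exact h' x hq hp
    simp [this] at h

theorem pvIE_union (q a b : List Int) :
    (PySem.Set.inter q (PySem.Set.union a b)).isEmpty
      = ((PySem.Set.inter q a).isEmpty && (PySem.Set.inter q b).isEmpty) := by
  by_cases h : (PySem.Set.inter q (PySem.Set.union a b)).isEmpty = true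
  · rw [h]; symm
    rw [pvIE_iff] at h
    have ha : (PySem.Set.inter q a).isEmpty = true := by
      rw [pvIE_iff]; intro x hq hx
      exact h x hq (by rw [PySem.Set.mem_union]; exact Or.inl hx)
    have hb : (PySem.Set.inter q b).isEmpty = true := by
      rw [pvIE_iff]; intro x hq hx
      exact h x hq (by rw [PySem.Set.mem_union]; exact Or.inr hx)
    rw [ha, hb]; rfl
  · rw [Bool.not_eq_true] at h; rw [h]; symm
    rw [Bool.eq_false_iff]
    intro h'
    rw [Bool.and_eq_true, pvIE_iff, pvIE_iff] at h'
    have : (PySem.Set.inter q (PySem.Set.union a b)).isEmpty = true := by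
      rw [pvIE_iff]; intro x hq hx
      rw [PySem.Set.mem_union] at hx
      cases hx with
      | inl hx => exact h'.1 x hq hx
      | inr hx => exact h'.2 x hq hx
    simp [this] at h

theorem pvIE_empty (q : List Int) :
    (PySem.Set.inter q PySem.Set.empty).isEmpty = true := by
  rw [pvIE_iff]; intro x _ hx; simp [PySem.Set.empty] at hx

theorem pvAll_and {α : Type} (l : List α) (f g : α → Bool) :
    l.all (fun x => f x && g x) = (l.all f && l.all g) := by
  induction l with
  | nil => rfl
  | cons x xs ih =>
    simp only [List.all_cons, ih]
    cases f x <;> cases g x <;> cases xs.all f <;> cases xs.all g <;> rfl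

-- the single pass with accumulator 'seen' computes: every petal disjoint from 'seen',
-- and the petals pairwise disjoint
theorem pvPetalScan_eq (core : PySem.Set Int) (ss : List (List Int)) (seen : PySem.Set Int) :
    pvPetalScan core ss seen
      = (ss.all (fun s => (PySem.Set.inter (PySem.Set.diff (PySem.Set.ofList s) core) seen).isEmpty)
          && pvPairwiseDisjoint (ss.map (fun s => PySem.Set.diff (PySem.Set.ofList s) core))) := by
  induction ss generalizing seen with
  | nil => rfl
  | cons s rest ih =>
    simp only [pvPetalScan, pvPairwiseDisjoint, List.all_cons, List.map_cons, List.all_map, Function.comp_def]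
    rw [ih]
    simp only [pvIE_union, pvAll_and]
    have hc : (rest.all fun t =>
        (PySem.Set.inter (PySem.Set.diff (PySem.Set.ofList t) core)
          (PySem.Set.diff (PySem.Set.ofList s) core)).isEmpty)
        = (rest.all fun t =>
        (PySem.Set.inter (PySem.Set.diff (PySem.Set.ofList s) core)
          (PySem.Set.diff (PySem.Set.ofList t) core)).isEmpty) := by
      simp only [pvIE_comm]
    cases h : (PySem.Set.inter (PySem.Set.diff (PySem.Set.ofList s) core) seen).isEmpty
    · rfl
    · simp only [Bool.true_and, if_true]
      rw [hc]
      cases h1 : rest.all fun t =>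
          (PySem.Set.inter (PySem.Set.diff (PySem.Set.ofList t) core) seen).isEmpty <;>
      cases h2 : rest.all fun t =>
          (PySem.Set.inter (PySem.Set.diff (PySem.Set.ofList s) core)
            (PySem.Set.diff (PySem.Set.ofList t) core)).isEmpty <;>
      cases h3 : pvPairwiseDisjoint (rest.map fun t => PySem.Set.diff (PySem.Set.ofList t) core) <;>
      rfl

-- per-combination agreement of the two inner bodies
theorem pvBody_eq (combo : List (List Int)) :
    (match combo.map (fun s => PySem.Set.ofList s) with
      | [] => false
      | c0 :: cs =>
        let core := cs.foldl PySem.Set.inter c0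
        pvPairwiseDisjoint ((combo.map (fun s => PySem.Set.ofList s)).map
          (fun s => PySem.Set.diff s core)))
      = (match combo.map (fun s => PySem.Set.ofList s) with
      | [] => false
      | c0 :: cs => pvPetalScan (cs.foldl PySem.Set.inter c0) combo PySem.Set.empty) := by
  cases combo with
  | nil => rfl
  | cons s ss =>
    simp only [List.map_cons]
    rw [pvPetalScan_eq]
    have : ((s :: ss).all fun t =>
        (PySem.Set.inter (PySem.Set.diff (PySem.Set.ofList t)
          ((ss.map fun u => PySem.Set.ofList u).foldl PySem.Set.inter (PySem.Set.ofList s)))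
          PySem.Set.empty).isEmpty) = true := by
      rw [List.all_eq_true]; intro t _; exact pvIE_empty _
    rw [this, Bool.true_and, List.map_map]
    simp [Function.comp_def]

-- ===== VERDICT (by name: the statement is the Claim_ definition above) =====
theorem is_sunflower_spec : Claim_equal_is_sunflower := by
  intro sets k _ _
  unfold Spec_is_sunflower is_sunflower is_sunflower_alt
  by_cases h : (sets.length : Int) < k
  · simp [h]
  · simp only [if_neg h]
    congr 1
    funext combo
    exact pvBody_eq combo
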